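-- pv_equiv track=rewrite | github.com/its-Anshuman/POTD-GFG-LeetCode | GFG/Python/2025-08-01_Balancing_Consonants_and_Vowels_Ratio.py | countBalanced
-- ===== SOURCE A (Python) =====
-- from typing import List
-- from collections import defaultdict
--
-- def countBalanced(arr: List[str]) -> int:
--     mp = defaultdict(int)
--     mp[0] = 1
--     bal = 0
--     res = 0
--     for word in arr:
--         for c in word:
--             if c in 'aeiou':
--                 bal += 1
--             else:
--                 bal -= 1
--         res += mp[bal]
--         mp[bal] += 1
--     return res
-- ===== SOURCE B (Python) =====
-- from typing import List
--
-- def countBalanced(arr: List[str]) -> int: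
--     vowels = set('aeiou')
--     bal = 0
--     pref = [0]
--     for w in arr:
--         bal += 2 * sum(ch in vowels for ch in w) - len(w)
--         pref.append(bal)
--     pref.sort()
--     total = 0
--     run = 1
--     prev = pref[0]
--     for x in pref[1:]:
--         if x == prev:
--             run += 1
--         else:
--             total += run * (run - 1) // 2
--             run = 1
--             prev = x
--     return total + run * (run - 1) // 2
-- ===== Notes on version B (the rewrite author's own statement) =====
-- stated objective: alternative
-- what changed: B uses no hashmap at all: it materialises the prefix-balance list (word delta = 2*vowels - len), sorts it, and counts pairs by scanning runs of equal values in the sorted list, adding run*(run-1)//2 per run, instead of A's online dict of seen balances.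
import Mathlib
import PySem

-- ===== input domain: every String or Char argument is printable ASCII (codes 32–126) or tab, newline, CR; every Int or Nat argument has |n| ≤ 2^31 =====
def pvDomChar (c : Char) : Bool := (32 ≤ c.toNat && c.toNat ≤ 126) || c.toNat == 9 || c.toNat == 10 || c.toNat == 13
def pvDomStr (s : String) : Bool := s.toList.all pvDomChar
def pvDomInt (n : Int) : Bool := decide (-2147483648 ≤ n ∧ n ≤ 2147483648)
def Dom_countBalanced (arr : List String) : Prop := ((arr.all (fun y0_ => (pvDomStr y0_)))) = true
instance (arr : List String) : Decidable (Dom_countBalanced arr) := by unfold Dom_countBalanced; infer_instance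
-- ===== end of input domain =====

-- B drops the hashmap: it builds the prefix-balance list (word delta = 2*vowels - len),
-- sorts it, and sums run*(run-1)//2 over runs of equal values; objective: alternative.


-- ===== PORT A =====
-- 'c in "aeiou"' on a single character is exactly list membership of the char.
def pvStepA (s : PySem.Dict Int Int × Int × Int) (word : String) : PySem.Dict Int Int × Int × Int :=
  let bal := word.toList.foldl (fun b c => if "aeiou".toList.contains c then b + 1 else b - 1) s.2.1
  (s.1.modify bal 0 (· + 1), bal, s.2.2 + s.1.getD bal 0)

def countBalanced (arr : List String) : Int :=
  (arr.foldl pvStepA (PySem.Dict.empty.insert 0 1, 0, 0)).2.2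

-- ===== PORT B =====
-- sum(ch in vowels for ch in w) is the count of vowel characters of w.
def pvDelta (w : String) : Int :=
  2 * (w.toList.countP (fun ch => "aeiou".toList.contains ch) : Int) - PySem.Str.len w

-- one step of B's run scan over the sorted list: state (total, run, prev)
def pvScanStep (s : Int × Int × Int) (x : Int) : Int × Int × Int :=
  if x = s.2.2 then (s.1, s.2.1 + 1, s.2.2)
  else (s.1 + PySem.Int.floordiv (s.2.1 * (s.2.1 - 1)) 2, 1, x)

def countBalanced_alt (arr : List String) : Int :=
  let pref := (arr.foldl (fun (s : List Int × Int) w =>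
      let b := s.2 + pvDelta w
      (s.1 ++ [b], b)) ([0], 0)).1
  -- pref.sort(): the return-value claim is unaffected by the in-place mutation
  match PySem.List.sorted pref (fun x => x) false with
  | [] => 0  -- unreachable: pref starts from [0], never empty (totality guard only)
  | p0 :: rest =>
    let s := rest.foldl pvScanStep (0, 1, p0)
    s.1 + PySem.Int.floordiv (s.2.1 * (s.2.1 - 1)) 2

-- ===== PRECONDITION & SPEC =====
def Spec_countBalanced (arr : List String) (out : Int) : Prop := out = countBalanced_alt arr
instance (arr : List String) (out : Int) : Decidable (Spec_countBalanced arr out) := by unfold Spec_countBalanced; infer_instance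

-- ===== CLAIM (what is proved, stated in full; the proofs are below) =====
def Claim_equal_countBalanced : Prop := ∀ (arr : List String), Dom_countBalanced arr → Spec_countBalanced arr (countBalanced arr)

-- ===== LEMMAS AND PROOFS =====

/-- The successive prefix balances produced from start balance `b`. -/
def pvPref : List String → Int → List Int
  | [], _ => []
  | w :: ws, b => (b + pvDelta w) :: pvPref ws (b + pvDelta w)

/-- A's online pair count: for each new prefix, how often it was seen before. -/
def pvOnl : List Int → List Int → Int
  | _, [] => 0
  | seen, p :: ps => (seen.count p : Int) + pvOnl (seen ++ [p]) ps

/-- The per-run / per-frequency term c*(c-1)//2. -/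
def pvG (c : Int) : Int := PySem.Int.floordiv (c * (c - 1)) 2

/-- Pair total of a multiset: sum of pvG over the multiplicities of l. -/
def pvPairs (l : List Int) : Int :=
  ((PySem.Set.ofList l).map (fun k => pvG ((l.count k : Nat) : Int))).sum

/-- Structural version of B's scan loop. -/
def pvScan (total run prev : Int) : List Int → Int
  | [] => total + pvG run
  | x :: xs => if x = prev then pvScan total (run + 1) prev xs
               else pvScan (total + pvG run) 1 x xs

theorem pvInnerA (l : List Char) (b : Int) :
    l.foldl (fun b c => if "aeiou".toList.contains c then b + 1 else b - 1) b
      = b + (2 * (l.countP (fun ch => "aeiou".toList.contains ch) : Int) - l.length) := by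
  induction l generalizing b with
  | nil => simp
  | cons c t ih =>
    simp only [List.foldl_cons, List.countP_cons, List.length_cons, ih]
    by_cases h : "aeiou".toList.contains c = true <;>
      simp only [h, if_true] <;> push_cast <;> ring

theorem pvALoop (arr : List String) (seen : List Int) (b r : Int) :
    (arr.foldl pvStepA (PySem.Dict.counter seen, b, r)).2.2 = r + pvOnl seen (pvPref arr b) := by
  induction arr generalizing seen b r with
  | nil => simp [pvOnl, pvPref]
  | cons w ws ih =>
    have hstep : pvStepA (PySem.Dict.counter seen, b, r) w
        = (PySem.Dict.counter (seen ++ [b + pvDelta w]), b + pvDelta w,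
            r + (seen.count (b + pvDelta w) : Int)) := by
      simp only [pvStepA, pvInnerA, pvDelta, PySem.Str.len_eq,
        PySem.Dict.counter_append_singleton, PySem.Dict.getD_counter]
    simp only [List.foldl_cons, hstep, ih, pvPref, pvOnl]
    ring

theorem pvG_natCast (n : Nat) : pvG (n : Int) = ((n.choose 2 : Nat) : Int) := by
  cases n with
  | zero => decide
  | succ m =>
    have h1 : ((m + 1 : Nat) : Int) * (((m + 1 : Nat) : Int) - 1) = (((m + 1) * m : Nat) : Int) := by
      push_cast; ring
    have h2 : (m + 1).choose 2 = (m + 1) * m / 2 := by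
      rw [Nat.choose_two_right]; simp
    rw [pvG, h1, h2]
    exact_mod_cast PySem.Int.floordiv_natCast ((m + 1) * m) 2

theorem pvG_succ (n : Nat) : pvG ((n : Int) + 1) = pvG (n : Int) + (n : Int) := by
  rw [show ((n : Int) + 1) = (((n + 1 : Nat)) : Int) by push_cast; ring,
    pvG_natCast, pvG_natCast, Nat.choose_succ_succ, Nat.choose_one_right]
  push_cast; ring

theorem pvSumSingle (x v : Int) : ∀ (S : List Int), S.Nodup → x ∈ S →
    (S.map (fun k => if k = x then v else 0)).sum = v := by
  intro S
  induction S with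
  | nil => intro _ h; cases h
  | cons a t ih =>
    intro hnd hmem
    by_cases hax : a = x
    · have hx : x ∉ t := by rw [← hax]; exact (List.nodup_cons.mp hnd).1
      have hz : (t.map (fun k => if k = x then v else 0)).sum = 0 := by
        apply List.sum_eq_zero
        intro y hy
        rcases List.mem_map.mp hy with ⟨k, hk, rfl⟩
        rw [if_neg]
        rintro rfl; exact hx hk
      simp [hax, hz]
    · have ht : x ∈ t := by
        rcases List.mem_cons.mp hmem with h | h
        · exact absurd h.symm hax
        · exact h
      simp [hax, ih (List.nodup_cons.mp hnd).2 ht]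

theorem pvOfListAppend (l : List Int) (x : Int) :
    PySem.Set.ofList (l ++ [x]) = PySem.Set.add (PySem.Set.ofList l) x := by
  rw [PySem.Set.ofList_eq_foldl, PySem.Set.ofList_eq_foldl, List.foldl_append]
  rfl

theorem pvPairs_append_singleton (l : List Int) (x : Int) :
    pvPairs (l ++ [x]) = pvPairs l + (l.count x : Int) := by
  by_cases hx : x ∈ l
  · have hset : PySem.Set.ofList (l ++ [x]) = PySem.Set.ofList l := by
      rw [pvOfListAppend, PySem.Set.add]
      simp [PySem.Set.contains, (PySem.Set.mem_ofList l x).mpr hx]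
    have hterm : ∀ k ∈ PySem.Set.ofList l,
        pvG (((l ++ [x]).count k : Nat) : Int)
          = pvG ((l.count k : Nat) : Int) + (if k = x then (l.count x : Int) else 0) := by
      intro k _
      by_cases hk : k = x
      · subst hk
        have hc : (l ++ [k]).count k = l.count k + 1 := by
          rw [List.count_append]; simp
        rw [hc, if_pos rfl]
        push_cast
        exact pvG_succ _
      · have hc : (l ++ [x]).count k = l.count k := by
          rw [List.count_append,
            List.count_eq_zero_of_not_mem (by simp [hk] : k ∉ [x])]
          omega
        rw [hc, if_neg hk]
        simp
    unfold pvPairs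
    rw [hset, List.map_congr_left hterm, PySem.List.sum_map_add_int,
      pvSumSingle x _ _ (PySem.Set.nodup_ofList l) ((PySem.Set.mem_ofList l x).mpr hx)]
  · have hxc : PySem.Set.contains (PySem.Set.ofList l) x = false := by
      simp only [PySem.Set.contains]
      simpa using hx
    have hset : PySem.Set.ofList (l ++ [x]) = PySem.Set.ofList l ++ [x] := by
      rw [pvOfListAppend, PySem.Set.add, hxc]
      simp
    have hterm : ∀ k ∈ PySem.Set.ofList l,
        pvG (((l ++ [x]).count k : Nat) : Int) = pvG ((l.count k : Nat) : Int) := by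
      intro k hk
      have hkx : k ≠ x := by
        rintro rfl; exact hx ((PySem.Set.mem_ofList l k).mp hk)
      rw [List.count_append,
        List.count_eq_zero_of_not_mem (by simp [hkx] : k ∉ [x]), Nat.add_zero]
    have hcx : l.count x = 0 := List.count_eq_zero_of_not_mem hx
    have hlast : pvG (((l ++ [x]).count x : Nat) : Int) = 0 := by
      have hc : (l ++ [x]).count x = 1 := by
        rw [List.count_append, hcx]; simp
      rw [hc]; decide
    unfold pvPairs
    rw [hset, List.map_append, List.map_congr_left hterm, List.sum_append]
    have h1 : pvG 1 = 0 := by decide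
    simp [hcx, List.count_append, h1]

theorem pvBridge (ps : List Int) : ∀ (seen : List Int),
    pvPairs (seen ++ ps) = pvPairs seen + pvOnl seen ps := by
  induction ps with
  | nil => intro seen; simp [pvOnl]
  | cons p t ih =>
    intro seen
    have : seen ++ p :: t = (seen ++ [p]) ++ t := by simp
    rw [this, ih, pvPairs_append_singleton, pvOnl]
    ring

theorem pvBLoop (arr : List String) : ∀ (acc : List Int) (b : Int),
    (arr.foldl (fun (s : List Int × Int) w =>
        (s.1 ++ [s.2 + pvDelta w], s.2 + pvDelta w)) (acc, b)).1 = acc ++ pvPref arr b := by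
  induction arr with
  | nil => intro acc b; simp [pvPref]
  | cons w ws ih =>
    intro acc b
    simp only [List.foldl_cons, pvPref, ih]
    simp

/-- pvPairs only depends on the multiset of values. -/
theorem pvPairs_perm {l l' : List Int} (h : l.Perm l') : pvPairs l = pvPairs l' := by
  have hmem : ∀ a, a ∈ PySem.Set.ofList l ↔ a ∈ PySem.Set.ofList l' := by
    intro a
    rw [PySem.Set.mem_ofList, PySem.Set.mem_ofList]
    exact h.mem_iff
  have hperm : (PySem.Set.ofList l).Perm (PySem.Set.ofList l') :=
    (List.perm_ext_iff_of_nodup (PySem.Set.nodup_ofList l) (PySem.Set.nodup_ofList l')).mpr hmem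
  unfold pvPairs
  have hfun : ∀ k ∈ PySem.Set.ofList l', pvG ((l'.count k : Nat) : Int)
      = pvG ((l.count k : Nat) : Int) := by
    intro k _
    rw [h.count_eq]
  rw [List.map_congr_left hfun]
  exact (hperm.map _).sum_eq

/-- The B fold is the structural scan. -/
theorem pvFoldScan (l : List Int) : ∀ (t r p : Int),
    (l.foldl pvScanStep (t, r, p)).1
      + PySem.Int.floordiv ((l.foldl pvScanStep (t, r, p)).2.1
          * ((l.foldl pvScanStep (t, r, p)).2.1 - 1)) 2
      = pvScan t r p l := by
  induction l with
  | nil => intro t r p; simp [pvScan, pvG]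
  | cons x xs ih =>
    intro t r p
    by_cases hx : x = p
    · simp only [List.foldl_cons, pvScanStep, hx, pvScan, ih, if_true]
    · simp only [List.foldl_cons, pvScanStep, pvScan, if_neg hx, ih, pvG]

/-- Consuming a leading run of copies of prev. -/
theorem pvScan_replicate (m : Nat) : ∀ (t r p : Int) (rest : List Int),
    pvScan t r p (List.replicate m p ++ rest) = pvScan t (r + m) p rest := by
  induction m with
  | zero => intro t r p rest; simp
  | succ k ih =>
    intro t r p rest
    simp only [List.replicate_succ, List.cons_append, pvScan, ih, if_true]
    congr 1
    push_cast
    ring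

/-- Sorted-list decomposition: the head's copies form a leading run. -/
theorem pvSortedDecomp (x : Int) (xs : List Int) (hs : (x :: xs).Pairwise (· ≤ ·)) :
    ∃ r : List Int, x :: xs = List.replicate ((x :: xs).count x) x ++ r ∧
      x ∉ r ∧ r.Pairwise (· ≤ ·) := by
  have hle : ∀ y ∈ x :: xs, x ≤ y := by
    intro y hy
    rcases List.mem_cons.mp hy with h | h
    · exact le_of_eq h.symm
    · exact (List.pairwise_cons.mp hs).1 y h
  have hps : ((x :: xs).dropWhile (· == x)).Pairwise (· ≤ ·) :=
    List.Pairwise.sublist (List.dropWhile_sublist _) hs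
  have hnot : x ∉ (x :: xs).dropWhile (· == x) := by
    cases hd : (x :: xs).dropWhile (· == x) with
    | nil => simp
    | cons d ds =>
      have hne : (x :: xs).dropWhile (· == x) ≠ [] := by rw [hd]; simp
      have hdx0 := List.head_dropWhile_not (p := (· == x)) (l := x :: xs) hne
      have hdhead : ((x :: xs).dropWhile (· == x)).head hne = d := by
        simp [hd]
      rw [hdhead] at hdx0
      have hdne : d ≠ x := by simpa using hdx0
      have hdmem : d ∈ x :: xs := (List.dropWhile_sublist _).subset (by rw [hd]; exact List.mem_cons_self ..)
      have hxd : x < d := lt_of_le_of_ne (hle d hdmem) (Ne.symm hdne)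
      rw [hd] at hps
      intro hmem
      rcases List.mem_cons.mp hmem with h | h
      · exact hdne h.symm
      · have : d ≤ x := (List.pairwise_cons.mp hps).1 x h
        exact absurd this (not_le.mpr hxd)
  have htw : (x :: xs).takeWhile (· == x)
      = List.replicate ((x :: xs).takeWhile (· == x)).length x := by
    apply List.eq_replicate_of_mem
    intro y hy
    have := List.mem_takeWhile_imp hy
    simpa using this
  have hcnt : (x :: xs).count x = ((x :: xs).takeWhile (· == x)).length := by
    conv_lhs => rw [← List.takeWhile_append_dropWhile (p := (· == x)) (l := x :: xs)]
    rw [List.count_append, List.count_eq_zero_of_not_mem hnot, Nat.add_zero, htw]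
    simp
  refine ⟨(x :: xs).dropWhile (· == x), ?_, hnot, hps⟩
  conv_lhs => rw [← List.takeWhile_append_dropWhile (p := (· == x)) (l := x :: xs)]
  rw [hcnt, ← htw]

/-- Prepending a fresh run of c ≥ 1 copies of x adds pvG c pairs. -/
theorem pvPairs_replicate_append (c : Nat) (hc : 1 ≤ c) (x : Int) (r : List Int)
    (hx : x ∉ r) :
    pvPairs (List.replicate c x ++ r) = pvG (c : Int) + pvPairs r := by
  have hofl : PySem.Set.ofList (List.replicate c x ++ r) = x :: PySem.Set.ofList r := by
    have hx1 : PySem.Set.ofList (List.replicate c x) = [x] := by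
      rw [PySem.Set.ofList_eq_foldl]
      clear hx
      induction c with
      | zero => omega
      | succ k ih =>
        rcases Nat.eq_or_lt_of_le hc with h | h
        · rw [← h]; simp [PySem.Set.add, PySem.Set.contains]
        · have hk : 1 ≤ k := by omega
          rw [List.replicate_succ']
          rw [List.foldl_append, ih hk]
          simp [PySem.Set.add, PySem.Set.contains]
    rw [PySem.Set.ofList_eq_foldl, List.foldl_append, ← PySem.Set.ofList_eq_foldl, hx1]
    have : ∀ (rs : List Int), x ∉ rs → ∀ acc : List Int,
        rs.foldl PySem.Set.add (x :: acc) = x :: rs.foldl PySem.Set.add acc := by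
      intro rs
      induction rs with
      | nil => intro _ acc; rfl
      | cons y ys ih =>
        intro hmem acc
        have hyx : y ≠ x := fun h => hmem (h ▸ List.mem_cons_self ..)
        simp only [List.foldl_cons]
        have hadd : PySem.Set.add (x :: acc) y
            = x :: PySem.Set.add acc y := by
          by_cases hy : y ∈ acc <;>
            simp [PySem.Set.add, PySem.Set.contains, hyx, hy]
        rw [hadd, ih (fun h => hmem (List.mem_cons_of_mem _ h))]
    have h0 : PySem.Set.ofList r = r.foldl PySem.Set.add [] := PySem.Set.ofList_eq_foldl r
    rw [this r hx [], ← h0]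
  have hcx : (List.replicate c x ++ r).count x = c := by
    rw [List.count_append, List.count_replicate, List.count_eq_zero_of_not_mem hx]
    simp
  have hck : ∀ k ∈ PySem.Set.ofList r, (List.replicate c x ++ r).count k = r.count k := by
    intro k hk
    have hkx : k ≠ x := fun h => hx (h ▸ (PySem.Set.mem_ofList r k).mp hk)
    rw [List.count_append]
    simp [List.count_replicate, Ne.symm hkx]
  unfold pvPairs
  rw [hofl, List.map_cons, List.sum_cons, hcx]
  congr 1
  apply congrArg List.sum
  apply List.map_congr_left
  intro k hk
  rw [hck k hk]

/-- Main scan lemma: starting strictly below a sorted list. -/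
theorem pvScanMain : ∀ (n : Nat) (l : List Int), l.length ≤ n →
    l.Pairwise (· ≤ ·) → ∀ (total run prev : Int), (∀ y ∈ l, prev < y) →
    pvScan total run prev l = total + pvG run + pvPairs l := by
  intro n
  induction n with
  | zero =>
    intro l hl _ total run prev _
    have : l = [] := List.eq_nil_of_length_eq_zero (Nat.le_zero.mp hl)
    subst this
    simp [pvScan, pvPairs, PySem.Set.ofList]
  | succ m ih =>
    intro l hl hs total run prev hlt
    cases l with
    | nil => simp [pvScan, pvPairs, PySem.Set.ofList]
    | cons x xs =>
      obtain ⟨r, hdec, hxr, hrs⟩ := pvSortedDecomp x xs hs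
      set c := (x :: xs).count x with hc
      have hc1 : 1 ≤ c := List.count_pos_iff.mpr (List.mem_cons_self ..)
      have hxprev : x ≠ prev := by
        have := hlt x (List.mem_cons_self ..)
        exact fun h => absurd (h ▸ this) (lt_irrefl prev)
      have hrl : r.length + c = (x :: xs).length := by
        have h := congrArg List.length hdec
        rw [List.length_append, List.length_replicate] at h
        omega
      have hrlen : r.length ≤ m := by
        simp only [List.length_cons] at hl hrl
        omega
      have hrlt : ∀ y ∈ r, x < y := by
        intro y hy
        have hymem : y ∈ x :: xs := by rw [hdec]; exact List.mem_append_right _ hy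
        have hyne : y ≠ x := fun h => hxr (h ▸ hy)
        have hxy : x ≤ y := by
          rcases List.mem_cons.mp hymem with h | h
          · exact le_of_eq h.symm
          · exact (List.pairwise_cons.mp hs).1 y h
        exact lt_of_le_of_ne hxy (Ne.symm hyne)
      have hstep1 : pvScan total run prev (x :: xs)
          = pvScan (total + pvG run) 1 x (List.replicate (c - 1) x ++ r) := by
        have hxx : x :: xs = x :: (List.replicate (c - 1) x ++ r) := by
          conv_lhs => rw [hdec]
          rw [show c = (c - 1) + 1 by omega, List.replicate_succ]
          simp
        rw [hxx]
        simp [pvScan, hxprev]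
      rw [hstep1, pvScan_replicate, ih r hrlen hrs _ _ _ hrlt]
      have hcc : (1 : Int) + ((c - 1 : Nat) : Int) = (c : Int) := by
        push_cast [hc1]; omega
      rw [hcc]
      have hp : pvPairs (x :: xs) = pvG (c : Int) + pvPairs r := by
        rw [hdec]
        exact pvPairs_replicate_append c hc1 x r hxr
      rw [hp]
      ring

-- ===== VERDICT (by name: the statement is the Claim_ definition above) =====
theorem countBalanced_spec : Claim_equal_countBalanced := by
  intro arr _
  unfold Spec_countBalanced countBalanced
  -- A's side equals pvPairs of the prefix list
  have hinit : PySem.Dict.empty.insert (0:Int) (1:Int) = PySem.Dict.counter [(0:Int)] := by decide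
  rw [hinit, pvALoop arr [0] 0 0]
  have hA : (0 : Int) + pvOnl [0] (pvPref arr 0) = pvPairs ([(0:Int)] ++ pvPref arr 0) := by
    rw [pvBridge (pvPref arr 0) [0]]
    have h0 : pvPairs [(0:Int)] = 0 := by decide
    rw [h0]
  rw [hA]
  -- B's side
  set pref := [(0:Int)] ++ pvPref arr 0 with hpref
  have hfold : (arr.foldl (fun (s : List Int × Int) w =>
      (s.1 ++ [s.2 + pvDelta w], s.2 + pvDelta w)) ([0], 0)).1 = pref := pvBLoop arr [0] 0
  show pvPairs pref = countBalanced_alt arr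
  unfold countBalanced_alt
  simp only [hfold]
  have hperm : (PySem.List.sorted pref (fun x => x) false).Perm pref :=
    PySem.List.sorted_perm pref (fun x => x) false
  have hpairs : pvPairs (PySem.List.sorted pref (fun x => x) false) = pvPairs pref :=
    pvPairs_perm hperm
  have hpw : (PySem.List.sorted pref (fun x => x) false).Pairwise (· ≤ ·) := by
    have := PySem.List.sorted_pairwise pref (fun x => x)
    simpa using this
  cases hsort : PySem.List.sorted pref (fun x => x) false with
  | nil =>
    exfalso
    have : pref = [] := by
      have := hperm.length_eq
      rw [hsort] at this
      exact List.eq_nil_of_length_eq_zero this.symm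
    simp [hpref] at this
  | cons p0 rest =>
    simp only []
    rw [pvFoldScan rest 0 1 p0]
    rw [hsort] at hperm hpairs hpw
    obtain ⟨r, hdec, hxr, hrs⟩ := pvSortedDecomp p0 rest hpw
    set c := (p0 :: rest).count p0 with hc
    have hc1 : 1 ≤ c := List.count_pos_iff.mpr (List.mem_cons_self ..)
    have hrest : rest = List.replicate (c - 1) p0 ++ r := by
      have : p0 :: rest = p0 :: (List.replicate (c - 1) p0 ++ r) := by
        conv_lhs => rw [hdec]
        rw [show c = (c - 1) + 1 by omega, List.replicate_succ]
        simp
      injection this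
    have hrlt : ∀ y ∈ r, p0 < y := by
      intro y hy
      have hymem : y ∈ p0 :: rest := by rw [hdec]; exact List.mem_append_right _ hy
      have hyne : y ≠ p0 := fun h => hxr (h ▸ hy)
      have hxy : p0 ≤ y := by
        rcases List.mem_cons.mp hymem with h | h
        · exact le_of_eq h.symm
        · exact (List.pairwise_cons.mp hpw).1 y h
      exact lt_of_le_of_ne hxy (Ne.symm hyne)
    rw [hrest, pvScan_replicate, pvScanMain r.length r le_rfl hrs _ _ _ hrlt]
    have hcc : (1 : Int) + ((c - 1 : Nat) : Int) = (c : Int) := by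
      push_cast [hc1]; omega
    rw [hcc]
    have hp : pvPairs (p0 :: rest) = pvG (c : Int) + pvPairs r := by
      rw [hdec]
      exact pvPairs_replicate_append c hc1 p0 r hxr
    rw [← hpairs, hp]
    ring
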